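-- pv_equiv track=rewrite | github.com/xoals3094/Algorithm | 백준/Gold/14500. 테트로미노/테트로미노.py | get_rotated_all_polyomino
-- ===== SOURCE A (Python) =====
-- def get_rotated_all_polyomino(polyomino):
--     degrees_0 = [
--         [
--             polyomino_x,
--             polyomino_y
--         ]
--         for polyomino_x, polyomino_y in polyomino
--     ]
--
--     degrees_90 = [
--         [
--             polyomino_y,
--             -polyomino_x
--         ]
--         for polyomino_x, polyomino_y in polyomino
--     ]
--
--     degrees_180 = [
--         [
--             -polyomino_x,
--             -polyomino_y
--         ]
--         for polyomino_x, polyomino_y in polyomino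
--     ]
--
--     degrees_270 = [
--         [
--             -polyomino_y,
--             polyomino_x
--         ]
--         for polyomino_x, polyomino_y in polyomino
--     ]
--
--     return [degrees_0, degrees_90, degrees_180, degrees_270]
-- ===== SOURCE B (Python) =====
-- def get_rotated_all_polyomino(polyomino):
--     current = [[x, y] for x, y in polyomino]
--     result = [current]
--     for _ in range(3):
--         current = [[y, -x] for x, y in current]
--         result.append(current)
--     return result
-- ===== Notes on version B (the rewrite author's own statement) =====
-- stated objective: simpler
-- what changed: Instead of four independent closed-form comprehensions over the input, B derives each rotation from the previous one by iterating a single 90-degree rotation step three times, accumulating the chain.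
import Mathlib
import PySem

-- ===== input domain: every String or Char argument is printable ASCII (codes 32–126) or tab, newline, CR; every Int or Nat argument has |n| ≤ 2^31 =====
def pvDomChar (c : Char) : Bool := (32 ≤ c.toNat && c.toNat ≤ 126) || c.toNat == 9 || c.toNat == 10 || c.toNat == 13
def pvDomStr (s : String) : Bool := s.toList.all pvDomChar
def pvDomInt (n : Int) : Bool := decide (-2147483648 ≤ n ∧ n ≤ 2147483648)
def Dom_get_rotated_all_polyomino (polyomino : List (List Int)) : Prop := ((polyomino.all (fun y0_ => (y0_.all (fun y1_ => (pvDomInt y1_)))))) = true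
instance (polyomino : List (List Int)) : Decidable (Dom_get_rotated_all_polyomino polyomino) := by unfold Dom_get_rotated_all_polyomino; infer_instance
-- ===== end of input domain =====

-- B replaces A's four independent rotation comprehensions by a chain iterating one 90° step; simpler decomposition, same O(n) cost.

-- ===== PORT A =====
-- A unpacks each point as (x, y); under Pre_ each point has length 2, so getD 0/getD 1 are exact.
def get_rotated_all_polyomino (polyomino : List (List Int)) : List (List (List Int)) :=
  let degrees_0 := polyomino.map (fun p => [p.getD 0 0, p.getD 1 0])
  let degrees_90 := polyomino.map (fun p => [p.getD 1 0, -(p.getD 0 0)])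
  let degrees_180 := polyomino.map (fun p => [-(p.getD 0 0), -(p.getD 1 0)])
  let degrees_270 := polyomino.map (fun p => [-(p.getD 1 0), p.getD 0 0])
  [degrees_0, degrees_90, degrees_180, degrees_270]

-- ===== PORT B =====
-- one 90° rotation step applied to a list of [x, y] points
def pvRot90 (pts : List (List Int)) : List (List Int) :=
  pts.map (fun p => [p.getD 1 0, -(p.getD 0 0)])

def get_rotated_all_polyomino_alt (polyomino : List (List Int)) : List (List (List Int)) :=
  let current := polyomino.map (fun p => [p.getD 0 0, p.getD 1 0])
  ((List.range 3).foldl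
    (fun (st : List (List (List Int)) × List (List Int)) _ =>
      let c := pvRot90 st.2
      (st.1 ++ [c], c))
    ([current], current)).1

-- ===== PRECONDITION & SPEC =====
-- Pre_ excludes inputs whose points are not length-2 lists: Python A raises ValueError there (and so does B).
def Pre_get_rotated_all_polyomino (polyomino : List (List Int)) : Prop :=
  ∀ p ∈ polyomino, p.length = 2
instance (polyomino : List (List Int)) : Decidable (Pre_get_rotated_all_polyomino polyomino) := by
  unfold Pre_get_rotated_all_polyomino; infer_instance
def pvWitness_get_rotated_all_polyomino : List (List Int) := [[1, 2], [0, -3]]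

def Spec_get_rotated_all_polyomino (polyomino : List (List Int)) (out : List (List (List Int))) : Prop := out = get_rotated_all_polyomino_alt polyomino
instance (polyomino : List (List Int)) (out : List (List (List Int))) : Decidable (Spec_get_rotated_all_polyomino polyomino out) := by unfold Spec_get_rotated_all_polyomino; infer_instance

-- ===== CLAIM (what is proved, stated in full; the proofs are below) =====
def Claim_equal_get_rotated_all_polyomino : Prop := ∀ (polyomino : List (List Int)), Dom_get_rotated_all_polyomino polyomino → Pre_get_rotated_all_polyomino polyomino → Spec_get_rotated_all_polyomino polyomino (get_rotated_all_polyomino polyomino)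

-- ===== LEMMAS AND PROOFS =====
-- ===== VERDICT (by name: the statement is the Claim_ definition above) =====
theorem get_rotated_all_polyomino_spec : Claim_equal_get_rotated_all_polyomino := by
  intro polyomino _ _
  unfold Spec_get_rotated_all_polyomino get_rotated_all_polyomino get_rotated_all_polyomino_alt
  simp [List.range, List.range.loop, pvRot90, List.map_map, Function.comp]
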